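-- pv_equiv track=rewrite | github.com/deeppavlov/h-elmo | helmo/util/path_help.py | _get_index_of_last_non_matching
-- ===== SOURCE A (Python) =====
-- def pad_lists(lists, value):
--     if len(lists) == 0:
--         return []
--     n = max([len(ls) for ls in lists])
--     padded = []
--     for ls in lists:
--         ls = ls.copy()
--         ls += [value] * (n - len(ls))
--         padded.append(ls)
--     return padded
--
-- def _get_index_of_first_non_matching(lists):
--     num_lists = len(lists)
--     if num_lists < 2:
--         return None
--     max_len = max([len(ls) for ls in lists])
--     i = 0
--     while True:
--         if i >= max_len:
--             return None
--         non_matching_elements_found = False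
--         for j in range(num_lists - 1):
--             list_1 = lists[j]
--             list_2 = lists[j + 1]
--             if len(list_1) <= i or len(list_2) <= i:
--                 return None
--             if list_1[i] != list_2[i]:
--                 non_matching_elements_found = True
--         if non_matching_elements_found:
--             return i
--         i += 1
--
-- def _get_index_of_last_non_matching(lists):
--     if len(lists) == 0:
--         return None
--     padded_lists = pad_lists(lists, None)
--     n = len(padded_lists[0])
--     for ls in padded_lists:
--         ls.reverse()
--     i = _get_index_of_first_non_matching(padded_lists)
--     if i is None:
--         return None
--     return n - i - 1
-- ===== SOURCE B (Python) =====
-- def _get_index_of_last_non_matching(lists):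
--     if len(lists) < 2:
--         return None
--     max_len = max(len(ls) for ls in lists)
--     for i in range(max_len - 1, -1, -1):
--         if any((lists[j][i] if i < len(lists[j]) else None)
--                != (lists[j + 1][i] if i < len(lists[j + 1]) else None)
--                for j in range(len(lists) - 1)):
--             return i
--     return None
-- ===== Notes on version B (the rewrite author's own statement) =====
-- stated objective: simpler
-- what changed: B drops pad_lists and the reverse/first-non-matching helpers: a single backward scan over indices compares adjacent lists in place, using None for out-of-range positions instead of materialized padded+reversed copies.
import Mathlib
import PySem

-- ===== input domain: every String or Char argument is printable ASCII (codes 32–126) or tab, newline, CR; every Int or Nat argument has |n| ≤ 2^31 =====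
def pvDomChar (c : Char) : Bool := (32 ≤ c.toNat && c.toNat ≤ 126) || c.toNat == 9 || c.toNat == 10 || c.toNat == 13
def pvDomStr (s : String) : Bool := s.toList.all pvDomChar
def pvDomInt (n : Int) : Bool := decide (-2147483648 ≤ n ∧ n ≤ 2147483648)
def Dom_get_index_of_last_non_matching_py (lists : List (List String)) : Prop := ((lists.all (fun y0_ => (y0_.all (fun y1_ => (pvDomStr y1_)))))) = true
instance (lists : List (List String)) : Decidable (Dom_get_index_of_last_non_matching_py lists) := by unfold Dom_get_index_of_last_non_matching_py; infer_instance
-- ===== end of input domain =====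

-- B replaces A's pad_lists + reverse + first-non-matching helpers by a single backward
-- index scan comparing adjacent lists in place (objective: simpler).


-- ===== PORT A =====
-- pad_lists(lists, None): A pads string lists with the sentinel None, so padded
-- elements have type Option String (some s = original string, none = the pad value).
-- max([...]) is only reached on a nonempty list of Nat lengths, where foldl Nat.max 0 is exact.
def padListsPy (lists : List (List String)) : List (List (Option String)) :=
  if lists.length == 0 then []
  else
    let n := (lists.map List.length).foldl Nat.max 0
    lists.map (fun ls => ls.map some ++ List.replicate (n - ls.length) none)

-- the inner `for j in range(num_lists - 1)` loop of _get_index_of_first_non_matching,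
-- walked over adjacent pairs; none = the early `return None`, some b = the flag after the loop.
-- list_1[i] is only read after the bounds check, so in-range indexing l[i]? is exact.
def checkPairsPy (i : Nat) : List (List (Option String)) → Bool → Option Bool
  | l1 :: l2 :: rest, acc =>
    if l1.length ≤ i ∨ l2.length ≤ i then none
    else checkPairsPy i (l2 :: rest) (acc || decide (l1[i]? ≠ l2[i]?))
  | _, acc => some acc

-- the `while True` loop, measured by max_len - i
def fnmLoopPy (lists : List (List (Option String))) (maxLen : Nat) (i : Nat) : Option Int :=
  if _h : maxLen ≤ i then none
  else
    match checkPairsPy i lists false with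
    | none => none
    | some true => some (i : Int)
    | some false => fnmLoopPy lists maxLen (i + 1)
  termination_by maxLen - i
  decreasing_by omega

def firstNonMatchingPy (lists : List (List (Option String))) : Option Int :=
  if lists.length < 2 then none
  else fnmLoopPy lists ((lists.map List.length).foldl Nat.max 0) 0

def get_index_of_last_non_matching_py (lists : List (List String)) : Option Int :=
  if lists.length == 0 then none
  else
    let padded := padListsPy lists
    let n := (padded.headD []).length
    let reversedLists := padded.map List.reverse
    match firstNonMatchingPy reversedLists with
    | none => none
    | some i => some ((n : Int) - i - 1)

-- ===== PORT B =====
-- any(... for j in range(len(lists)-1)) over adjacent pairs;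
-- `lists[j][i] if i < len(lists[j]) else None` is exactly l[i]? : Option String.
def anyAdjDiffAlt (i : Nat) : List (List String) → Bool
  | l1 :: l2 :: rest => decide (l1[i]? ≠ l2[i]?) || anyAdjDiffAlt i (l2 :: rest)
  | _ => false

-- for i in range(max_len - 1, -1, -1): argument is the number of indices still to visit
def backScanAlt (lists : List (List String)) : Nat → Option Int
  | 0 => none
  | k + 1 => if anyAdjDiffAlt k lists then some (k : Int) else backScanAlt lists k

def get_index_of_last_non_matching_py_alt (lists : List (List String)) : Option Int :=
  if lists.length < 2 then none
  else backScanAlt lists ((lists.map List.length).foldl Nat.max 0)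

-- ===== PRECONDITION & SPEC =====
def Spec_get_index_of_last_non_matching_py (lists : List (List String)) (out : Option Int) : Prop := out = get_index_of_last_non_matching_py_alt lists
instance (lists : List (List String)) (out : Option Int) : Decidable (Spec_get_index_of_last_non_matching_py lists out) := by unfold Spec_get_index_of_last_non_matching_py; infer_instance

-- ===== CLAIM (what is proved, stated in full; the proofs are below) =====
def Claim_equal_get_index_of_last_non_matching_py : Prop := ∀ (lists : List (List String)), Dom_get_index_of_last_non_matching_py lists → Spec_get_index_of_last_non_matching_py lists (get_index_of_last_non_matching_py lists)

-- ===== LEMMAS AND PROOFS =====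

theorem init_le_foldl_max (l : List Nat) (a : Nat) : a ≤ l.foldl Nat.max a := by
  induction l generalizing a with
  | nil => simp
  | cons x xs ih => exact le_trans (Nat.le_max_left a x) (ih _)

theorem mem_le_foldl_max (l : List Nat) (a x : Nat) (hx : x ∈ l) : x ≤ l.foldl Nat.max a := by
  induction l generalizing a with
  | nil => cases hx
  | cons y ys ih =>
    rcases List.mem_cons.mp hx with h | h
    · subst h; exact le_trans (Nat.le_max_right a x) (init_le_foldl_max _ _)
    · exact ih _ h

theorem foldl_max_const (n : Nat) (l : List Nat) (a : Nat)
    (hl : ∀ x ∈ l, x = n) (ha : a ≤ n) (hne : l ≠ []) : l.foldl Nat.max a = n := by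
  induction l generalizing a with
  | nil => exact absurd rfl hne
  | cons x xs ih =>
    have hx : x = n := hl x (List.mem_cons_self ..)
    subst hx
    rcases xs.eq_nil_or_concat' with h | ⟨y, ys, rfl⟩
    · subst h; simpa using Nat.max_eq_right ha
    · exact ih _ (fun z hz => hl z (List.mem_cons_of_mem _ hz)) (Nat.max_le.mpr ⟨ha, le_rfl⟩) (by simp)

-- the padded-and-reversed list, read at i (for i < n), is the original list read at n-1-i
theorem pad_rev_get (n : Nat) (ls : List String) (i : Nat) (hlen : ls.length ≤ n) (hi : i < n) :
    ((ls.map some ++ List.replicate (n - ls.length) (none : Option String)).reverse)[i]? =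
      some (ls[n - 1 - i]?) := by
  have hplen : (ls.map some ++ List.replicate (n - ls.length) (none : Option String)).length = n := by
    simp; omega
  rw [List.getElem?_reverse (by omega), hplen]
  by_cases hj : n - 1 - i < ls.length
  · rw [List.getElem?_append_left (by simpa using hj)]
    simp [List.getElem?_map, List.getElem?_eq_getElem hj]
  · rw [List.getElem?_append_right (by simp; omega)]
    simp only [List.length_map]
    rw [List.getElem?_replicate]
    have : ¬ (n - 1 - i < ls.length) := hj
    rw [if_pos (by omega), List.getElem?_eq_none_iff.mpr (by omega)]

-- the inner loop on the padded+reversed suffix = B's any over the original suffix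
theorem checkPairs_eq (n : Nat) (i : Nat) (hi : i < n) :
    ∀ (sub : List (List String)) (acc : Bool), (∀ ls ∈ sub, ls.length ≤ n) →
      checkPairsPy i (sub.map (fun ls => (ls.map some ++ List.replicate (n - ls.length) (none : Option String)).reverse)) acc
        = some (acc || anyAdjDiffAlt (n - 1 - i) sub) := by
  intro sub
  induction sub with
  | nil => intro acc _; simp [checkPairsPy, anyAdjDiffAlt]
  | cons l1 tl ih =>
    intro acc hsub
    match tl, ih with
    | [], _ => simp [checkPairsPy, anyAdjDiffAlt]
    | l2 :: rest, ih =>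
      have h1 : l1.length ≤ n := hsub l1 (by simp)
      have h2 : l2.length ≤ n := hsub l2 (by simp)
      have hrl1 : ((l1.map some ++ List.replicate (n - l1.length) (none : Option String)).reverse).length = n := by
        simp; omega
      have hrl2 : ((l2.map some ++ List.replicate (n - l2.length) (none : Option String)).reverse).length = n := by
        simp; omega
      simp only [List.map_cons, checkPairsPy, hrl1, hrl2]
      rw [if_neg (by omega)]
      rw [pad_rev_get n l1 i h1 hi, pad_rev_get n l2 i h2 hi]
      have hcmp : (decide ((some (l1[n - 1 - i]?) : Option (Option String)) ≠ some (l2[n - 1 - i]?)))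
          = decide (l1[n - 1 - i]? ≠ l2[n - 1 - i]?) := by
        simp
      rw [hcmp]
      have := ih (acc || decide (l1[n - 1 - i]? ≠ l2[n - 1 - i]?))
        (fun ls hls => hsub ls (List.mem_cons_of_mem _ hls))
      rw [List.map_cons] at this
      rw [this]
      simp only [anyAdjDiffAlt]
      rw [Bool.or_assoc]

-- the while-loop, composed with A's final index flip, = B's backward scan
theorem loop_eq (lists : List (List String)) (n : Nat)
    (hlen : ∀ ls ∈ lists, ls.length ≤ n) :
    ∀ k, k ≤ n →
      (match fnmLoopPy (lists.map (fun ls => (ls.map some ++ List.replicate (n - ls.length) (none : Option String)).reverse)) n (n - k) with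
        | none => none
        | some i => some ((n : Int) - i - 1)) = backScanAlt lists k := by
  intro k
  induction k with
  | zero =>
    intro _
    rw [fnmLoopPy]
    simp [backScanAlt]
  | succ k ih =>
    intro hk
    have hi : n - (k + 1) < n := by omega
    rw [fnmLoopPy, dif_neg (by omega)]
    rw [checkPairs_eq n (n - (k + 1)) hi lists false hlen]
    have hnk : n - 1 - (n - (k + 1)) = k := by omega
    rw [hnk]
    simp only [Bool.false_or, backScanAlt]
    by_cases hd : anyAdjDiffAlt k lists = true
    · rw [hd]
      simp only [if_true]
      congr 1
      omega
    · rw [Bool.not_eq_true] at hd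
      rw [hd]
      simp only [Bool.false_eq_true, if_false]
      have harg : n - (k + 1) + 1 = n - k := by omega
      rw [harg]
      exact ih (by omega)

theorem main_eq (lists : List (List String)) :
    get_index_of_last_non_matching_py lists = get_index_of_last_non_matching_py_alt lists := by
  match lists with
  | [] => rfl
  | [l] =>
    simp [get_index_of_last_non_matching_py, get_index_of_last_non_matching_py_alt,
      padListsPy, firstNonMatchingPy]
  | l0 :: l1 :: rest =>
    set lists := l0 :: l1 :: rest with hlists
    have hne : lists.length ≥ 2 := by simp [hlists]
    set n := (lists.map List.length).foldl Nat.max 0 with hn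
    have hlenle : ∀ ls ∈ lists, ls.length ≤ n :=
      fun ls hls => mem_le_foldl_max _ _ _ (List.mem_map_of_mem hls)
    have hpad : padListsPy lists =
        lists.map (fun ls => ls.map some ++ List.replicate (n - ls.length) (none : Option String)) := by
      rw [padListsPy, if_neg (by simp [hlists])]
    -- the head of padded has length n
    have hheadlen : ((padListsPy lists).headD []).length = n := by
      rw [hpad, hlists]
      simp only [List.map_cons, List.headD_cons, List.length_append, List.length_map,
        List.length_replicate]
      have : l0.length ≤ n := hlenle l0 (by simp [hlists])
      omega
    -- the padded+reversed lists all have length n, so their max_len is n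
    set rev := (padListsPy lists).map List.reverse with hrev
    have hrevmap : rev = lists.map (fun ls => (ls.map some ++ List.replicate (n - ls.length) (none : Option String)).reverse) := by
      rw [hrev, hpad, List.map_map]; rfl
    have hrevlen : ∀ x ∈ rev.map List.length, x = n := by
      intro x hx
      rw [hrevmap, List.map_map] at hx
      rcases List.mem_map.mp hx with ⟨ls, hls, hxeq⟩
      have := hlenle ls hls
      simp at hxeq
      omega
    have hmax : (rev.map List.length).foldl Nat.max 0 = n := by
      apply foldl_max_const n _ 0 hrevlen (Nat.zero_le _)
      simp [hrevmap, hlists]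
    have hrevcount : ¬ rev.length < 2 := by
      simp [hrevmap, hlists]
    unfold get_index_of_last_non_matching_py get_index_of_last_non_matching_py_alt
    rw [if_neg (by simp [hlists]), if_neg (by simp [hlists])]
    simp only [← hrev, ← hn, hheadlen]
    rw [firstNonMatchingPy, if_neg hrevcount, hmax]
    have := loop_eq lists n hlenle n (le_refl n)
    rw [Nat.sub_self] at this
    rw [← hrevmap] at this
    exact this

-- ===== VERDICT (by name: the statement is the Claim_ definition above) =====
theorem get_index_of_last_non_matching_py_spec : Claim_equal_get_index_of_last_non_matching_py := by
  intro lists _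
  unfold Spec_get_index_of_last_non_matching_py
  exact main_eq lists
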